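-- pv_equiv track=rewrite | github.com/nickjcroucher/pbp_AMR_prediction | interrogate_rf.py | tree_feature_pairs
-- ===== SOURCE A (Python) =====
-- from typing import Dict, Tuple, List
--
-- def tree_feature_pairs(tree: Dict, feature_pair: Tuple[int, int]) -> bool:
--     """
--     Are two features linked in the decision path of a tree
--     """
--     internal_nodes = tree.keys()
--
--     # check both nodes are actually in the tree
--     if not all([i in internal_nodes for i in feature_pair]):
--         return False
--
--     def traverse_tree(feature_pair):
--         def recursive_search(node):
--             children = tree[node]
--             if any([i == feature_pair[1] for i in children]):
--                 return True
--             if all([i not in internal_nodes for i in children]):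
--                 return False
--             return any(
--                 [
--                     recursive_search(child)
--                     for child in children
--                     if child in internal_nodes
--                 ]
--             )
--
--         return recursive_search(feature_pair[0])
--
--     # start from first node and traverse down the tree
--     same_path = traverse_tree(sorted(feature_pair, reverse=False))
--     if same_path:
--         return True
--
--     # start from second node and traverse down the tree
--     same_path = traverse_tree(sorted(feature_pair, reverse=True))
--     if same_path:
--         return True
--
--     return False
-- ===== SOURCE B (Python) =====
-- def tree_feature_pairs(tree, feature_pair):
--     """
--     Are two features linked in the decision path of a tree
--     """
--     keys = tree.keys()
--
--     # check both nodes are actually in the tree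
--     if not all(i in keys for i in feature_pair):
--         return False
--
--     lo, hi = sorted(feature_pair)
--
--     def linked(start, target):
--         # backward fixed point: after k rounds, `reach` holds every key from
--         # which `target` is reachable in at most k steps through internal nodes
--         reach = set()
--         for _ in range(len(tree) + 1):
--             reach = {x for x in keys
--                      if any(c == target or c in reach for c in tree[x])}
--         return start in reach
--
--     return linked(lo, hi) or linked(hi, lo)
-- ===== Notes on version B (the rewrite author's own statement) =====
-- stated objective: alternative
-- what changed: Replaces the unmemoized recursive DFS over the tree by a backward fixed-point iteration: len(tree)+1 rounds rebuild the set of keys from which the target is reachable, and the answer is membership of the start node in that set.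
-- outside the precondition, e.g. on tree_feature_pairs({1: [1, 2], 2: []}, (1, 2)): A returns True, B returns True
import Mathlib
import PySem

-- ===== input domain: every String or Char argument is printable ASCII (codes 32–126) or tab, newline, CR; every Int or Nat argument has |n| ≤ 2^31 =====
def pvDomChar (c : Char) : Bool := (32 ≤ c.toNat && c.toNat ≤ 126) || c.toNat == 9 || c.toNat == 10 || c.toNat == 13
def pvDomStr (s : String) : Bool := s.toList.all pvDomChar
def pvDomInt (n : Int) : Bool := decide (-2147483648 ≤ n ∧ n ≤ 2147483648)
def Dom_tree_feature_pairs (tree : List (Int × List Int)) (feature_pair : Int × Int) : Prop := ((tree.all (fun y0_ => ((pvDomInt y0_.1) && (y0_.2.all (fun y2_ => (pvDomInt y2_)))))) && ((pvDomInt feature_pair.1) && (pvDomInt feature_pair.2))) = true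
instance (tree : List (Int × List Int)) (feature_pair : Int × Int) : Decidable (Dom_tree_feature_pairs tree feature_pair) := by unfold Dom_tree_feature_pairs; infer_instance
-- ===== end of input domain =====

-- B replaces A's unmemoized recursive DFS by a backward fixed-point reachability iteration
-- (an alternative decomposition: set iteration instead of recursion).

-- ===== PORT A =====

-- tree[node]: first-match association lookup; every call site passes a node that is a key,
-- so Python's KeyError cannot fire (`getD []` is never taken on admitted inputs).
def pvChildren (tree : List (Int × List Int)) (node : Int) : List Int :=
  (List.lookup node tree).getD []

-- A's inner `recursive_search`; the fuel only makes the recursion total: under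
-- Pre_ (acyclic key-graph) the recursion depth is at most the number of keys,
-- so fuel `tree.length + 1` is never exhausted.
def pvRecSearch (tree : List (Int × List Int)) (keys : List Int) (target : Int) :
    Nat → Int → Bool
  | 0, _ => false
  | fuel + 1, node =>
    let children := pvChildren tree node
    if children.any (fun i => i == target) then true
    else if children.all (fun i => !(keys.contains i)) then false
    else (children.filter (fun c => keys.contains c)).any
      (fun c => pvRecSearch tree keys target fuel c)

def tree_feature_pairs (tree : List (Int × List Int)) (feature_pair : Int × Int) : Bool :=
  let keys := tree.map Prod.fst
  if !([feature_pair.1, feature_pair.2].all (fun i => keys.contains i)) then false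
  else
    -- sorted(feature_pair) = [lo, hi]; reverse=True = [hi, lo]
    let lo := if feature_pair.1 ≤ feature_pair.2 then feature_pair.1 else feature_pair.2
    let hi := if feature_pair.1 ≤ feature_pair.2 then feature_pair.2 else feature_pair.1
    if pvRecSearch tree keys hi (tree.length + 1) lo then true
    else if pvRecSearch tree keys lo (tree.length + 1) hi then true
    else false

-- ===== PORT B =====

-- Source B's `linked`: `reach` after k rounds of the set-comprehension update
def pvIterReach (tree : List (Int × List Int)) (keys : List Int) (target : Int) :
    Nat → List Int
  | 0 => []
  | k + 1 =>
    let reach := pvIterReach tree keys target k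
    keys.filter (fun x => (pvChildren tree x).any (fun c => c == target || reach.contains c))

def pvLinked (tree : List (Int × List Int)) (keys : List Int) (start target : Int) : Bool :=
  (pvIterReach tree keys target (tree.length + 1)).contains start

def tree_feature_pairs_alt (tree : List (Int × List Int)) (feature_pair : Int × Int) : Bool :=
  let keys := tree.map Prod.fst
  if !([feature_pair.1, feature_pair.2].all (fun i => keys.contains i)) then false
  else
    let lo := if feature_pair.1 ≤ feature_pair.2 then feature_pair.1 else feature_pair.2
    let hi := if feature_pair.1 ≤ feature_pair.2 then feature_pair.2 else feature_pair.1
    pvLinked tree keys lo hi || pvLinked tree keys hi lo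

-- ===== PRECONDITION & SPEC =====

-- one closure step of the key-graph: add the children of every member that is a key
def pvStep (tree : List (Int × List Int)) (keys : List Int) (s : List Int) : List Int :=
  s ++ ((s.filter (fun x => keys.contains x)).flatMap (pvChildren tree)).filter
    (fun c => !(s.contains c))

def pvClosure (tree : List (Int × List Int)) (keys : List Int) : Nat → List Int → List Int
  | 0, s => s
  | k + 1, s => pvClosure tree keys k (pvStep tree keys s)

-- Pre_ excludes trees whose key-graph contains a cycle — there A's recursion (no visited set)
-- can diverge, so A may not return — and association lists with duplicate keys, which no Python
-- dict can produce.  Acyclicity of a finite graph is stated via its reachability closure: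
-- pvStep/pvClosure compute plain graph reachability (no target, no search driver) — they are a
-- property of the input graph, not a re-run of either port.
def Pre_tree_feature_pairs (tree : List (Int × List Int)) (feature_pair : Int × Int) : Prop :=
  (tree.map Prod.fst).Nodup ∧
  ∀ x ∈ tree.map Prod.fst,
    (pvClosure tree (tree.map Prod.fst) tree.length (pvChildren tree x)).contains x = false

instance (tree : List (Int × List Int)) (feature_pair : Int × Int) :
    Decidable (Pre_tree_feature_pairs tree feature_pair) := by
  unfold Pre_tree_feature_pairs; infer_instance

def pvWitness_tree_feature_pairs : (List (Int × List Int)) × (Int × Int) :=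
  ([(1, [2, 5]), (2, [3])], (1, 2))

def Spec_tree_feature_pairs (tree : List (Int × List Int)) (feature_pair : Int × Int) (out : Bool) : Prop := out = tree_feature_pairs_alt tree feature_pair
instance (tree : List (Int × List Int)) (feature_pair : Int × Int) (out : Bool) : Decidable (Spec_tree_feature_pairs tree feature_pair out) := by unfold Spec_tree_feature_pairs; infer_instance

-- ===== CLAIM (what is proved, stated in full; the proofs are below) =====
def Claim_equal_tree_feature_pairs : Prop := ∀ (tree : List (Int × List Int)) (feature_pair : Int × Int), Dom_tree_feature_pairs tree feature_pair → Pre_tree_feature_pairs tree feature_pair → Spec_tree_feature_pairs tree feature_pair (tree_feature_pairs tree feature_pair)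

-- ===== LEMMAS AND PROOFS =====

theorem pvIterReach_subset (tree : List (Int × List Int)) (keys : List Int) (target : Int)
    (k : Nat) (x : Int) (h : x ∈ pvIterReach tree keys target k) : x ∈ keys := by
  cases k with
  | zero => simp [pvIterReach] at h
  | succ n =>
    simp only [pvIterReach] at h
    exact (List.mem_filter.mp h).1

-- the heart of the equivalence: on each key, A's fuel-k recursive search answers exactly
-- "is this key in B's reach-set after k rounds"
theorem pvRec_eq_iter (tree : List (Int × List Int)) (keys : List Int) (target : Int) :
    ∀ (k : Nat) (x : Int), x ∈ keys →
      pvRecSearch tree keys target k x = (pvIterReach tree keys target k).contains x := by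
  intro k
  induction k with
  | zero => intro x _; simp [pvRecSearch, pvIterReach]
  | succ n ih =>
    intro x hx
    simp only [pvRecSearch, pvIterReach]
    rw [Bool.eq_iff_iff]
    constructor
    · intro h
      split_ifs at h with h1 h2
      · -- a child equals the target
        simp only [List.any_eq_true, beq_iff_eq] at h1
        obtain ⟨c, hc, rfl⟩ := h1
        simp only [List.contains_eq_mem, List.mem_filter, List.any_eq_true, decide_eq_true_eq]
        exact ⟨hx, c, hc, by simp⟩
      · -- descended into a key child for which the search succeeded
        simp only [List.any_eq_true, List.mem_filter] at h
        obtain ⟨c, ⟨hc, hck⟩, hrec⟩ := h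
        rw [ih c (by simpa using hck)] at hrec
        simp only [List.contains_eq_mem, List.mem_filter, List.any_eq_true, decide_eq_true_eq]
        refine ⟨hx, c, hc, ?_⟩
        simp only [Bool.or_eq_true]
        exact Or.inr (by simpa [List.contains_eq_mem] using hrec)
    · intro h
      simp only [List.contains_eq_mem, List.mem_filter, List.any_eq_true,
        decide_eq_true_eq, Bool.or_eq_true, beq_iff_eq] at h
      obtain ⟨-, c, hc, hcase⟩ := h
      rcases hcase with rfl | hreach
      · -- target is a child: first branch of A fires
        have h1 : (pvChildren tree x).any (fun i => i == c) = true := by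
          simp only [List.any_eq_true, beq_iff_eq]; exact ⟨c, hc, rfl⟩
        simp [h1]
      · -- c is in the reach set, hence a key, and the recursive call succeeds on it
        have hck : c ∈ keys := pvIterReach_subset tree keys target n c (by
          simpa [List.contains_eq_mem] using hreach)
        have hrec : pvRecSearch tree keys target n c = true := by
          rw [ih c hck]; simpa [List.contains_eq_mem] using hreach
        split_ifs with h1 h2
        · rfl
        · -- "all children are leaves" contradicts c being a key child
          exfalso
          simp only [List.all_eq_true, Bool.not_eq_true'] at h2
          have := h2 c hc
          simp [List.contains_eq_mem, hck] at this
        · simp only [List.any_eq_true, List.mem_filter]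
          exact ⟨c, ⟨hc, by simp [List.contains_eq_mem, hck]⟩, hrec⟩

theorem tree_feature_pairs_spec : Claim_equal_tree_feature_pairs := by
  intro tree fp _dom _pre
  unfold Spec_tree_feature_pairs tree_feature_pairs tree_feature_pairs_alt pvLinked
  by_cases h1 : fp.1 ∈ tree.map Prod.fst
  · by_cases h2 : fp.2 ∈ tree.map Prod.fst
    · have hlo : (if fp.1 ≤ fp.2 then fp.1 else fp.2) ∈ tree.map Prod.fst := by
        split_ifs <;> assumption
      have hhi : (if fp.1 ≤ fp.2 then fp.2 else fp.1) ∈ tree.map Prod.fst := by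
        split_ifs <;> assumption
      have e1 := pvRec_eq_iter tree (tree.map Prod.fst)
        (if fp.1 ≤ fp.2 then fp.2 else fp.1) (tree.length + 1)
        (if fp.1 ≤ fp.2 then fp.1 else fp.2) hlo
      have e2 := pvRec_eq_iter tree (tree.map Prod.fst)
        (if fp.1 ≤ fp.2 then fp.1 else fp.2) (tree.length + 1)
        (if fp.1 ≤ fp.2 then fp.2 else fp.1) hhi
      simp [List.contains_eq_mem, h1, h2, e1, e2]
    · simp [List.contains_eq_mem, h2]
  · simp [List.contains_eq_mem, h1]
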